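-- pv_equiv track=rewrite | github.com/ThomasMorleyAdarga/eegcned-awstest | data_utils.py | get_seg_features
-- ===== SOURCE A (Python) =====
-- def get_seg_features(string,tags):
--     tags_dict = {'O': 0, '1_PER': 1, '1_Time': 2, '1_GPE': 3, '1_ORG': 4, '1_FAC': 5, '1_LOC': 6, '1_VEH': 7, '1_Numeric': 8, '1_WEA': 9, '1_Crime': 10, '1_Sentence': 11, '1_Job_Title': 12, '1_Contact_Info': 13}
--     seg_feature = []
--     for tag in tags:
--         if "1_PER" in tag:
--             entity_tag = 1
--         elif "1_GPE" in tag: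
--             entity_tag = 2
--         elif "1_Time" in tag:
--             entity_tag = 3
--         elif "1_ORG" in tag:
--             entity_tag = 4
--         elif "1_FAC" in tag:
--             entity_tag = 5
--         elif "1_VEH" in tag:
--             entity_tag = 6
--         elif "1_GPE" in tag:
--             entity_tag = 7
--         elif "1_Numeric" in tag:
--             entity_tag = 8
--         elif "1_Crime" in tag:
--             entity_tag = 9
--         elif "1_Sentence" in tag:
--             entity_tag = 10
--         elif "1_Contact_Info" in tag:
--             entity_tag = 11
--         elif "1_Job_Title" in tag:
--             entity_tag = 12
--         elif "1_WEA" in tag: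
--             entity_tag = 13
--         else:
--             entity_tag = 0
--         seg_feature.append(entity_tag)
--     return seg_feature
-- ===== SOURCE B (Python) =====
-- _PATTERNS = [("1_PER", 1), ("1_GPE", 2), ("1_Time", 3), ("1_ORG", 4),
--              ("1_FAC", 5), ("1_VEH", 6), ("1_Numeric", 8), ("1_Crime", 9),
--              ("1_Sentence", 10), ("1_Contact_Info", 11), ("1_Job_Title", 12),
--              ("1_WEA", 13)]
--
-- def get_seg_features(string, tags):
--     # pattern-major sweep: start from all zeros, then stamp each pattern's code
--     # over its matching positions, from lowest priority to highest, so the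
--     # highest-priority (earliest) matching pattern's write wins.
--     codes = [0] * len(tags)
--     for pat, code in reversed(_PATTERNS):
--         for i, tag in enumerate(tags):
--             if pat in tag:
--                 codes[i] = code
--     return codes
-- ===== Notes on version B (the rewrite author's own statement) =====
-- stated objective: alternative
-- what changed: Inverts the loop nesting: instead of running a 14-branch first-match cascade per tag, B sweeps pattern-major over an all-zero code array, stamping each pattern's code over matching positions from lowest to highest priority so the last (highest-priority) write wins.
import Mathlib
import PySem

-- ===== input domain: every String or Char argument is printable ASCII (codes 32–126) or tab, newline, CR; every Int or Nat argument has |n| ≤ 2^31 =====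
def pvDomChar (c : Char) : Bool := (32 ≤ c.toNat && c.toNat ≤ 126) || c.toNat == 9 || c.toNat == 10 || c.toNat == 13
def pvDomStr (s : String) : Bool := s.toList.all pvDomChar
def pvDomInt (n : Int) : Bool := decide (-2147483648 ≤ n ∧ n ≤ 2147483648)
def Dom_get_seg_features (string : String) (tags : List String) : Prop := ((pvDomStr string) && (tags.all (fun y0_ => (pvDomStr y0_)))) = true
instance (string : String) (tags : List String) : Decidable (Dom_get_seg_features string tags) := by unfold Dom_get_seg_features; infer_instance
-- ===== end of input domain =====

-- B inverts the loop nesting: a pattern-major overwrite sweep (lowest to highest priority) over an all-zero code array, instead of A's per-tag if/elif cascade (alternative; same cost).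

-- ===== PORT A =====
def get_seg_features (string : String) (tags : List String) : List Int :=
  tags.foldl (fun seg_feature tag =>
    let entity_tag : Int :=
      if PySem.Str.isIn "1_PER" tag then 1
      else if PySem.Str.isIn "1_GPE" tag then 2
      else if PySem.Str.isIn "1_Time" tag then 3
      else if PySem.Str.isIn "1_ORG" tag then 4
      else if PySem.Str.isIn "1_FAC" tag then 5
      else if PySem.Str.isIn "1_VEH" tag then 6
      else if PySem.Str.isIn "1_GPE" tag then 7
      else if PySem.Str.isIn "1_Numeric" tag then 8
      else if PySem.Str.isIn "1_Crime" tag then 9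
      else if PySem.Str.isIn "1_Sentence" tag then 10
      else if PySem.Str.isIn "1_Contact_Info" tag then 11
      else if PySem.Str.isIn "1_Job_Title" tag then 12
      else if PySem.Str.isIn "1_WEA" tag then 13
      else 0
    seg_feature ++ [entity_tag]) []

-- ===== PORT B =====
def pvPatterns : List (String × Int) :=
  [("1_PER", 1), ("1_GPE", 2), ("1_Time", 3), ("1_ORG", 4),
   ("1_FAC", 5), ("1_VEH", 6), ("1_Numeric", 8), ("1_Crime", 9),
   ("1_Sentence", 10), ("1_Contact_Info", 11), ("1_Job_Title", 12),
   ("1_WEA", 13)]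

-- the inner position-wise overwrite pass ("for i, tag in enumerate(tags): if pat in tag: codes[i] = code")
def pvStamp (tags : List String) (codes : List Int) (pc : String × Int) : List Int :=
  List.zipWith (fun tag c => if PySem.Str.isIn pc.1 tag then pc.2 else c) tags codes

def get_seg_features_alt (string : String) (tags : List String) : List Int :=
  pvPatterns.reverse.foldl (pvStamp tags) (tags.map (fun _ => (0 : Int)))

-- ===== PRECONDITION & SPEC =====
def Spec_get_seg_features (string : String) (tags : List String) (out : List Int) : Prop := out = get_seg_features_alt string tags
instance (string : String) (tags : List String) (out : List Int) : Decidable (Spec_get_seg_features string tags out) := by unfold Spec_get_seg_features; infer_instance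

-- ===== CLAIM (what is proved, stated in full; the proofs are below) =====
def Claim_equal_get_seg_features : Prop := ∀ (string : String) (tags : List String), Dom_get_seg_features string tags → Spec_get_seg_features string tags (get_seg_features string tags)

-- ===== LEMMAS AND PROOFS =====

-- per-element agreement: the cascade equals first-match lookup in pvPatterns
set_option maxHeartbeats 2000000 in
theorem pv_elem_eq (tag : String) :
    (if PySem.Str.isIn "1_PER" tag then (1:Int)
     else if PySem.Str.isIn "1_GPE" tag then 2
     else if PySem.Str.isIn "1_Time" tag then 3
     else if PySem.Str.isIn "1_ORG" tag then 4
     else if PySem.Str.isIn "1_FAC" tag then 5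
     else if PySem.Str.isIn "1_VEH" tag then 6
     else if PySem.Str.isIn "1_GPE" tag then 7
     else if PySem.Str.isIn "1_Numeric" tag then 8
     else if PySem.Str.isIn "1_Crime" tag then 9
     else if PySem.Str.isIn "1_Sentence" tag then 10
     else if PySem.Str.isIn "1_Contact_Info" tag then 11
     else if PySem.Str.isIn "1_Job_Title" tag then 12
     else if PySem.Str.isIn "1_WEA" tag then 13
     else 0) =
    (match pvPatterns.find? (fun pc => PySem.Str.isIn pc.1 tag) with
     | some pc => pc.2
     | none => 0) := by
  simp only [pvPatterns, List.find?_cons, List.find?_nil]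
  cases h1 : PySem.Str.isIn "1_PER" tag <;>
  cases h2 : PySem.Str.isIn "1_GPE" tag <;>
  cases h3 : PySem.Str.isIn "1_Time" tag <;>
  cases h4 : PySem.Str.isIn "1_ORG" tag <;>
  cases h5 : PySem.Str.isIn "1_FAC" tag <;>
  cases h6 : PySem.Str.isIn "1_VEH" tag <;>
  cases h7 : PySem.Str.isIn "1_Numeric" tag <;>
  cases h8 : PySem.Str.isIn "1_Crime" tag <;>
  cases h9 : PySem.Str.isIn "1_Sentence" tag <;>
  cases h10 : PySem.Str.isIn "1_Contact_Info" tag <;>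
  cases h11 : PySem.Str.isIn "1_Job_Title" tag <;>
  cases h12 : PySem.Str.isIn "1_WEA" tag <;> simp

theorem pv_foldl_map (tags : List String) (acc : List Int) (f : String → Int) :
    tags.foldl (fun s t => s ++ [f t]) acc = acc ++ tags.map f := by
  induction tags generalizing acc with
  | nil => simp
  | cons t ts ih => simp [List.foldl, ih]

theorem pv_zipWith_map_right (tags : List String) (h : String → Int)
    (F : String → Int → Int) :
    List.zipWith F tags (tags.map h) = tags.map (fun t => F t (h t)) := by
  induction tags with
  | nil => rfl
  | cons t ts ih => simp [ih]

-- invariant of B's pattern-major sweep: after processing ps on a base that is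
-- positionwise h, every position holds the first match in ps, falling back to h
theorem pv_sweep (tags : List String) (ps : List (String × Int)) (h : String → Int) :
    ps.reverse.foldl (pvStamp tags) (tags.map h) =
    tags.map (fun tag =>
      match ps.find? (fun pc => PySem.Str.isIn pc.1 tag) with
      | some pc => pc.2
      | none => h tag) := by
  induction ps generalizing h with
  | nil => simp
  | cons p ps ih =>
    rw [List.reverse_cons, List.foldl_append]
    simp only [List.foldl_cons, List.foldl_nil]
    rw [ih]
    unfold pvStamp
    rw [pv_zipWith_map_right]
    refine List.map_congr_left (fun tag _ => ?_)
    simp only [PySem.Str.isIn]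
    cases hp : PySem.Chars.isIn p.1.toList tag.toList <;> simp [hp]

-- ===== VERDICT (by name: the statement is the Claim_ definition above) =====
theorem get_seg_features_spec : Claim_equal_get_seg_features := by
  intro string tags _
  unfold Spec_get_seg_features get_seg_features get_seg_features_alt
  rw [pv_foldl_map, pv_sweep]
  simp only [List.nil_append]
  exact List.map_congr_left (fun tag _ => pv_elem_eq tag)
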